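-- pv_equiv track=rewrite | github.com/molgenis/variable-taxon-mapper | vtm/utils.py | resolve_prefixed_column
-- ===== SOURCE A (Python) =====
-- from typing import Any, Iterable, List, Optional
--
-- def resolve_prefixed_column(
--     columns: Iterable[str], name: str, prefix: Optional[str] = None
-- ) -> Optional[str]:
--     """Resolve ``name`` against ``columns`` with an optional prefix fallback."""
--
--     if prefix:
--         candidate = f"{prefix}{name}"
--         if candidate in columns:
--             return candidate
--     if name in columns:
--         return name
--     target = name.lower()
--     for column in columns:
--         if str(column).lower().endswith(target):
--             return column
--     return None
-- ===== SOURCE B (Python) =====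
-- def resolve_prefixed_column(columns, name, prefix=None):
--     """Resolve ``name`` against ``columns`` with an optional prefix fallback."""
--     candidate = f"{prefix}{name}" if prefix else None
--     target = name.lower()
--     found_exact = False
--     suffix_match = None
--     for column in columns:
--         if candidate is not None and column == candidate:
--             return candidate
--         if column == name:
--             found_exact = True
--         if suffix_match is None and column.lower().endswith(target):
--             suffix_match = column
--     if found_exact:
--         return name
--     return suffix_match
-- ===== Notes on version B (the rewrite author's own statement) =====
-- stated objective: alternative
-- what changed: Replaced A's up-to-three separate scans of columns (candidate membership, exact membership, suffix search) with a single pass that breaks early on the prefixed candidate and records exact/suffix matches in flags.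
import Mathlib
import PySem

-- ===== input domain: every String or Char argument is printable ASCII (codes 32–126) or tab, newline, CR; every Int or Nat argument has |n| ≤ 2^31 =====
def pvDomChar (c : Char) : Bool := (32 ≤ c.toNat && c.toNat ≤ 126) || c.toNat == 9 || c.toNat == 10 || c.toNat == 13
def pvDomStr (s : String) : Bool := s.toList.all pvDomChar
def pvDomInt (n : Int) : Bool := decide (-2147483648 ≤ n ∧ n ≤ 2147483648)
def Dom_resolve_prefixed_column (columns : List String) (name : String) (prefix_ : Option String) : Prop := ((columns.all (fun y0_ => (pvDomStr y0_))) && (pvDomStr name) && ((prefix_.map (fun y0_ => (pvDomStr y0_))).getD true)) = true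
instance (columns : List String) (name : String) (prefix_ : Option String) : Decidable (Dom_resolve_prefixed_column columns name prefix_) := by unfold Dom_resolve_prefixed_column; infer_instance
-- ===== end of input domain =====

-- B replaces A's up-to-three separate scans of columns with one single pass (early break on the
-- prefixed candidate, flags for the exact and first suffix match); objective: alternative decomposition.

-- ===== PORT A =====
-- literal port of A: prefix-candidate membership, then exact membership, then a suffix scan
def resolve_prefixed_column (columns : List String) (name : String) (prefix_ : Option String) : Option String :=
  let step1 : Option String :=
    match prefix_ with
    | some p =>
      if p ≠ "" then
        let candidate := p ++ name
        if candidate ∈ columns then some candidate else none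
      else none
    | none => none
  match step1 with
  | some c => some c
  | none =>
    if name ∈ columns then some name
    else
      let target := PySem.Str.lower name
      columns.find? (fun column => PySem.Str.endswith (PySem.Str.lower column) target)

-- ===== PORT B =====
-- the single-pass loop of Source B: break on candidate, record exact / first suffix match
def rpcLoop (candidate : Option String) (name target : String) :
    List String → Bool → Option String → Option String
  | [], foundExact, suffixMatch => if foundExact then some name else suffixMatch
  | column :: rest, foundExact, suffixMatch =>
    if candidate = some column then some column
    else
      rpcLoop candidate name target rest (foundExact || column == name)
        (match suffixMatch with
         | some s => some s
         | none =>
           if PySem.Str.endswith (PySem.Str.lower column) target then some column else none)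

def resolve_prefixed_column_alt (columns : List String) (name : String) (prefix_ : Option String) : Option String :=
  let candidate : Option String :=
    match prefix_ with
    | some p => if p ≠ "" then some (p ++ name) else none
    | none => none
  rpcLoop candidate name (PySem.Str.lower name) columns false none

-- ===== PRECONDITION & SPEC =====
def Spec_resolve_prefixed_column (columns : List String) (name : String) (prefix_ : Option String) (out : Option String) : Prop := out = resolve_prefixed_column_alt columns name prefix_
instance (columns : List String) (name : String) (prefix_ : Option String) (out : Option String) : Decidable (Spec_resolve_prefixed_column columns name prefix_ out) := by unfold Spec_resolve_prefixed_column; infer_instance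

-- ===== CLAIM (what is proved, stated in full; the proofs are below) =====
def Claim_equal_resolve_prefixed_column : Prop := ∀ (columns : List String) (name : String) (prefix_ : Option String), Dom_resolve_prefixed_column columns name prefix_ → Spec_resolve_prefixed_column columns name prefix_ (resolve_prefixed_column columns name prefix_)

-- ===== LEMMAS AND PROOFS =====

-- the loop with no candidate: "exact name" wins, else the carried suffix match, else the first suffix match ahead
theorem rpcLoop_none (name target : String) (cols : List String) (fe : Bool) (sm : Option String) :
    rpcLoop none name target cols fe sm =
      if fe || cols.contains name then some name
      else sm.orElse (fun _ => cols.find? (fun c => PySem.Str.endswith (PySem.Str.lower c) target)) := by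
  induction cols generalizing fe sm with
  | nil =>
    cases sm <;> simp [rpcLoop, Option.orElse]
  | cons col rest ih =>
    by_cases hcn : name = col
    · subst hcn
      simp [rpcLoop, ih]
    · have hcn' : (col == name) = false := by
        simp only [beq_eq_false_iff_ne, ne_eq]; exact fun h => hcn h.symm
      cases sm with
      | some s =>
        simp [rpcLoop, ih, hcn', hcn, Option.orElse]
      | none =>
        by_cases hsfx : PySem.Chars.endswith (PySem.Chars.lower col.toList) target.toList = true <;>
          by_cases hfe : fe <;>
            simp [rpcLoop, ih, hcn', hcn, hfe, hsfx, List.find?,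
              Option.orElse]

-- the loop with a candidate: if the candidate occurs, it is returned; otherwise the loop behaves as without it
theorem rpcLoop_some (c name target : String) (cols : List String) (fe : Bool) (sm : Option String) :
    rpcLoop (some c) name target cols fe sm =
      if cols.contains c then some c else rpcLoop none name target cols fe sm := by
  induction cols generalizing fe sm with
  | nil => simp [rpcLoop]
  | cons col rest ih =>
    by_cases hc : c = col
    · subst hc; simp [rpcLoop]
    · simp [rpcLoop, hc, ih]

theorem resolve_prefixed_column_eq (columns : List String) (name : String) (prefix_ : Option String) :
    resolve_prefixed_column columns name prefix_ = resolve_prefixed_column_alt columns name prefix_ := by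
  unfold resolve_prefixed_column resolve_prefixed_column_alt
  cases prefix_ with
  | none =>
    by_cases h : name ∈ columns <;>
      simp [rpcLoop_none, h, Option.orElse]
  | some p =>
    by_cases hp : p = ""
    · by_cases h : name ∈ columns <;>
        simp [hp, rpcLoop_none, h, Option.orElse]
    · by_cases hc : (p ++ name) ∈ columns <;>
        by_cases h : name ∈ columns <;>
          simp [hp, rpcLoop_some, rpcLoop_none, hc, h, Option.orElse]

-- ===== VERDICT (by name: the statement is the Claim_ definition above) =====
theorem resolve_prefixed_column_spec : Claim_equal_resolve_prefixed_column := by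
  intro columns name prefix_ _
  unfold Spec_resolve_prefixed_column
  exact resolve_prefixed_column_eq columns name prefix_
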